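-- pv_equiv track=rewrite | github.com/Nazuna-io/storybench | professional_report_generator.py | extract_failure_explanation
-- ===== SOURCE A (Python) =====
-- def extract_failure_explanation(eval_text, criterion):
--     """Extract explanation of why something failed for criterion."""
--     sentences = eval_text.split('.')
--
--     # Look for critical language
--     critical_terms = ['weak', 'fails', 'lacking', 'insufficient', 'poor', 'limited']
--     for sentence in sentences:
--         if any(term in sentence.lower() for term in critical_terms):
--             if criterion.replace('_', ' ') in sentence.lower() or criterion in sentence.lower():
--                 clean_sentence = sentence.strip()
--                 if len(clean_sentence) > 20 and len(clean_sentence) < 200: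
--                     return clean_sentence
--
--     # Fallback
--     for sentence in sentences:
--         if any(term in sentence.lower() for term in critical_terms):
--             clean_sentence = sentence.strip()
--             if len(clean_sentence) > 20 and len(clean_sentence) < 200:
--                 return clean_sentence
--
--     return "Limited performance in this area"
-- ===== SOURCE B (Python) =====
-- def extract_failure_explanation(eval_text, criterion):
--     """Extract explanation of why something failed for criterion."""
--     critical_terms = ('weak', 'fails', 'lacking', 'insufficient', 'poor', 'limited')
--     crit_spaced = criterion.replace('_', ' ')
--     fallback = None
--     for sentence in eval_text.split('.'):
--         low = sentence.lower()
--         if not any(term in low for term in critical_terms):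
--             continue
--         clean = sentence.strip()
--         if not (20 < len(clean) < 200):
--             continue
--         if crit_spaced in low or criterion in low:
--             return clean
--         if fallback is None:
--             fallback = clean
--     return fallback if fallback is not None else "Limited performance in this area"
-- ===== Notes on version B (the rewrite author's own statement) =====
-- stated objective: simpler
-- what changed: A's two sequential scans (criterion-matching pass, then critical-only fallback pass) are fused into a single loop that returns immediately on a criterion match and records the first length-valid critical sentence as the fallback, with criterion.replace hoisted out of the loop.
import Mathlib
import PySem

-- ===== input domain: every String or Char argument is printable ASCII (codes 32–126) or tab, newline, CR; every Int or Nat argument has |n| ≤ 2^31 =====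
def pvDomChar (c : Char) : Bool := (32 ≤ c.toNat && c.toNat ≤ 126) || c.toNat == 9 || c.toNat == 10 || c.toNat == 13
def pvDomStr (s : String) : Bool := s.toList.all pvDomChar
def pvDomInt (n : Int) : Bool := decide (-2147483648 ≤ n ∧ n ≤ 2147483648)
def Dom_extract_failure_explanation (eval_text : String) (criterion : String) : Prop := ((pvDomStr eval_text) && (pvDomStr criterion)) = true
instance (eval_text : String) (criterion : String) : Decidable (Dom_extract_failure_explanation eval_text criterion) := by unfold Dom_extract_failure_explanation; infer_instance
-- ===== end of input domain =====

-- B fuses A's two sequential scans into one loop with a fallback accumulator (objective: simpler); exact equivalence proved.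


-- ===== PORT A =====
-- critical_terms = ['weak', 'fails', 'lacking', 'insufficient', 'poor', 'limited']
def pvCritTermsA : List (List Char) :=
  ["weak".toList, "fails".toList, "lacking".toList, "insufficient".toList, "poor".toList, "limited".toList]

-- first loop of A (early return = some): critical language, then criterion match, then length check
def pvALoop1 (criterion : List Char) : List (List Char) → Option (List Char)
  | [] => none
  | s :: rest =>
    if pvCritTermsA.any (fun t => PySem.Chars.isIn t (PySem.Chars.lower s)) then
      if PySem.Chars.isIn (PySem.Chars.replace criterion ['_'] [' ']) (PySem.Chars.lower s)
          || PySem.Chars.isIn criterion (PySem.Chars.lower s) then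
        if 20 < PySem.Chars.len (PySem.Chars.strip s) ∧ PySem.Chars.len (PySem.Chars.strip s) < 200 then
          some (PySem.Chars.strip s)
        else pvALoop1 criterion rest
      else pvALoop1 criterion rest
    else pvALoop1 criterion rest

-- second (fallback) loop of A: critical language, then length check
def pvALoop2 : List (List Char) → Option (List Char)
  | [] => none
  | s :: rest =>
    if pvCritTermsA.any (fun t => PySem.Chars.isIn t (PySem.Chars.lower s)) then
      if 20 < PySem.Chars.len (PySem.Chars.strip s) ∧ PySem.Chars.len (PySem.Chars.strip s) < 200 then
        some (PySem.Chars.strip s)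
      else pvALoop2 rest
    else pvALoop2 rest

def extract_failure_explanation (eval_text : String) (criterion : String) : String :=
  let sentences := PySem.Chars.splitOn eval_text.toList ['.']
  match pvALoop1 criterion.toList sentences with
  | some r => String.ofList r
  | none =>
    match pvALoop2 sentences with
    | some r => String.ofList r
    | none => "Limited performance in this area"

-- ===== PORT B =====
def pvCritTermsB : List (List Char) :=
  ["weak".toList, "fails".toList, "lacking".toList, "insufficient".toList, "poor".toList, "limited".toList]

-- single loop of B: skip non-critical / wrong-length sentences, return on criterion match,
-- else remember the first surviving sentence as the fallback
def pvBLoop (critSpaced criterion : List Char) (fb : Option (List Char)) : List (List Char) → List Char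
  | [] =>
    match fb with
    | some f => f
    | none => "Limited performance in this area".toList
  | s :: rest =>
    if ¬ (pvCritTermsB.any (fun t => PySem.Chars.isIn t (PySem.Chars.lower s)) = true) then
      pvBLoop critSpaced criterion fb rest
    else if ¬ (20 < PySem.Chars.len (PySem.Chars.strip s) ∧ PySem.Chars.len (PySem.Chars.strip s) < 200) then
      pvBLoop critSpaced criterion fb rest
    else if PySem.Chars.isIn critSpaced (PySem.Chars.lower s)
        || PySem.Chars.isIn criterion (PySem.Chars.lower s) then
      PySem.Chars.strip s
    else
      pvBLoop critSpaced criterion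
        (match fb with | none => some (PySem.Chars.strip s) | some f => some f) rest

def extract_failure_explanation_alt (eval_text : String) (criterion : String) : String :=
  String.ofList (pvBLoop (PySem.Chars.replace criterion.toList ['_'] [' ']) criterion.toList none
    (PySem.Chars.splitOn eval_text.toList ['.']))

-- ===== PRECONDITION & SPEC =====
def Spec_extract_failure_explanation (eval_text : String) (criterion : String) (out : String) : Prop := out = extract_failure_explanation_alt eval_text criterion
instance (eval_text : String) (criterion : String) (out : String) : Decidable (Spec_extract_failure_explanation eval_text criterion out) := by unfold Spec_extract_failure_explanation; infer_instance

-- ===== CLAIM (what is proved, stated in full; the proofs are below) =====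
def Claim_equal_extract_failure_explanation : Prop := ∀ (eval_text : String) (criterion : String), Dom_extract_failure_explanation eval_text criterion → Spec_extract_failure_explanation eval_text criterion (extract_failure_explanation eval_text criterion)

-- ===== LEMMAS AND PROOFS =====
lemma pvTerms_eq : pvCritTermsB = pvCritTermsA := rfl

-- B's single loop, at any fallback state, computes A's two-pass result with fb consulted between the passes.
lemma pvBLoop_eq (criterion : List Char) (l : List (List Char)) (fb : Option (List Char)) :
    pvBLoop (PySem.Chars.replace criterion ['_'] [' ']) criterion fb l =
      match pvALoop1 criterion l with
      | some r => r
      | none =>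
        match fb with
        | some f => f
        | none =>
          match pvALoop2 l with
          | some r => r
          | none => "Limited performance in this area".toList := by
  induction l generalizing fb with
  | nil => cases fb <;> rfl
  | cons s rest ih =>
    simp only [pvALoop1, pvALoop2, pvBLoop, pvTerms_eq]
    by_cases hP : pvCritTermsA.any (fun t => PySem.Chars.isIn t (PySem.Chars.lower s)) = true
    · rw [if_neg (not_not_intro hP), if_pos hP, if_pos hP]
      by_cases hV : 20 < PySem.Chars.len (PySem.Chars.strip s) ∧ PySem.Chars.len (PySem.Chars.strip s) < 200
      · rw [if_neg (not_not_intro hV), if_pos hV]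
        by_cases hM : (PySem.Chars.isIn (PySem.Chars.replace criterion ['_'] [' ']) (PySem.Chars.lower s)
            || PySem.Chars.isIn criterion (PySem.Chars.lower s)) = true
        · rw [if_pos hM, if_pos hM, if_pos hV]
        · rw [if_neg hM, if_neg hM, if_pos hV]
          cases fb with
          | none =>
            rw [ih (some (PySem.Chars.strip s))]
          | some f =>
            rw [ih (some f)]
      · rw [if_pos hV, if_neg hV]
        by_cases hM : (PySem.Chars.isIn (PySem.Chars.replace criterion ['_'] [' ']) (PySem.Chars.lower s)
            || PySem.Chars.isIn criterion (PySem.Chars.lower s)) = true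
        · rw [if_pos hM, if_neg hV, ih fb]
        · rw [if_neg hM, if_neg hV, ih fb]
    · rw [if_pos hP, if_neg hP, if_neg hP, ih fb]

-- ===== VERDICT (by name: the statement is the Claim_ definition above) =====
theorem extract_failure_explanation_spec : Claim_equal_extract_failure_explanation := by
  intro eval_text criterion _
  unfold Spec_extract_failure_explanation extract_failure_explanation extract_failure_explanation_alt
  rw [pvBLoop_eq criterion.toList (PySem.Chars.splitOn eval_text.toList ['.']) none]
  cases h1 : pvALoop1 criterion.toList (PySem.Chars.splitOn eval_text.toList ['.']) with
  | some r => simp only [h1]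
  | none =>
    cases h2 : pvALoop2 (PySem.Chars.splitOn eval_text.toList ['.']) with
    | some r => simp only [h1, h2]
    | none => simp only [h1, h2]; rfl
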